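-- pv_equiv track=rewrite | github.com/regularJo96/Four-in-a-Row | connect_four.py | checkDiagonalBottomRightToLeft
-- ===== SOURCE A (Python) =====
-- def checkDiagonalBottomRightToLeft(player,place,board,count):
--     row=place[0]
--     col=place[1]
--     spot=board[row][col]
--
--     if(spot!=player):
--         return count
--     count=count+1
--     return checkDiagonalBottomRightToLeft(player,[row-1,col-1],board,count)
-- ===== SOURCE B (Python) =====
-- def checkDiagonalBottomRightToLeft(player, place, board, count):
--     # Iterative rewrite: scan down-left with a while loop instead of
--     # rebuilding a [row-1, col-1] list and recursing.
--     row = place[0]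
--     col = place[1]
--     while board[row][col] == player:
--         count += 1
--         row -= 1
--         col -= 1
--     return count
-- ===== Notes on version B (the rewrite author's own statement) =====
-- stated objective: simpler
-- what changed: Replaced the tail recursion that rebuilds a fresh [row-1, col-1] list on every step with a plain while loop over two integer counters; the cell access stays inside the loop condition so negative-index wraparound and the eventual IndexError occur at the same step.
import Mathlib
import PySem

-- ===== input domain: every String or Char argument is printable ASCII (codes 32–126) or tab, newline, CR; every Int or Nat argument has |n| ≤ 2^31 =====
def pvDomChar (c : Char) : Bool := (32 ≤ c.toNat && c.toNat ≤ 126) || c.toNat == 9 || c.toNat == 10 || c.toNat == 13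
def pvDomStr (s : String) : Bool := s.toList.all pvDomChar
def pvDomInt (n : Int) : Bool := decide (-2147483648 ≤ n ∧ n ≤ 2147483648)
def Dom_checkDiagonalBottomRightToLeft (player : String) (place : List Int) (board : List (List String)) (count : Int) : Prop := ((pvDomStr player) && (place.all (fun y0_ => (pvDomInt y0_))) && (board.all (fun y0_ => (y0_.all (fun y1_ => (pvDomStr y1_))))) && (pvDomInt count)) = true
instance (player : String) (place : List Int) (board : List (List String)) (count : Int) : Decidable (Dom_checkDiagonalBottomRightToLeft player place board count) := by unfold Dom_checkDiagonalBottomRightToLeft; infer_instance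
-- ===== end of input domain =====

-- B replaces A's tail recursion (which rebuilds a fresh [row-1, col-1] list every step)
-- with a plain while loop over two integer counters; objective: simpler.

-- board[r][c] exactly as Python evaluates it in A (none = IndexError)
def pvCellA (board : List (List String)) (r c : Int) : Option String :=
  (PySem.List.pyGet? board r).bind (fun xs => PySem.List.pyGet? xs c)

-- board[r][c] exactly as Python evaluates it in B's loop condition (none = IndexError)
def pvCellB (board : List (List String)) (r c : Int) : Option String :=
  match PySem.List.pyGet? board r with
  | some xs => PySem.List.pyGet? xs c
  | none => none

-- cited by the ports' termination proofs: a successful subscript means r is in wrap range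
theorem pvCellA_row_lb {board : List (List String)} {r c : Int} {v : String}
    (h : pvCellA board r c = some v) : -(board.length : Int) ≤ r := by
  unfold pvCellA at h
  cases hrow : PySem.List.pyGet? board r with
  | none => rw [hrow] at h; simp at h
  | some xs =>
    by_contra hlt
    have : PySem.List.pyGet? board r = none := by
      rw [PySem.List.pyGet?_eq_none_iff]
      intro hin
      exact hlt hin.1
    rw [this] at h; simp at h

theorem pvCellB_row_lb {board : List (List String)} {r c : Int} {v : String}
    (h : pvCellB board r c = some v) : -(board.length : Int) ≤ r := by
  unfold pvCellB at h
  cases hrow : PySem.List.pyGet? board r with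
  | none => rw [hrow] at h; simp at h
  | some xs =>
    by_contra hlt
    have : PySem.List.pyGet? board r = none := by
      rw [PySem.List.pyGet?_eq_none_iff]
      intro hin
      exact hlt hin.1
    rw [this] at h; simp at h

-- place[0] / place[1] on a list with both coordinates present (cited by A's termination proof)
theorem pvGet0 (row col : Int) (rest : List Int) :
    PySem.List.pyGet? (row :: col :: rest) 0 = some row := by
  have := PySem.List.pyGet?_of_nonneg (xs := row :: col :: rest) (i := 0) (by omega)
  simpa using this

-- ===== PORT A =====
def checkDiagonalBottomRightToLeft (player : String) (place : List Int) (board : List (List String)) (count : Int) : Int :=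
  match h0 : PySem.List.pyGet? place 0, h1 : PySem.List.pyGet? place 1 with
  | some row, some col =>
    match hspot : pvCellA board row col with
    | some spot =>
      if spot ≠ player then count
      else checkDiagonalBottomRightToLeft player [row - 1, col - 1] board (count + 1)
    | none => count   -- Python raises IndexError here; excluded by Pre_
  | _, _ => count     -- Python raises IndexError here; excluded by Pre_
termination_by ((PySem.List.pyGet? place 0).getD 0 + (board.length : Int) + 1).toNat
decreasing_by
  have hr := pvCellA_row_lb hspot
  simp only [h0, pvGet0, Option.getD_some]
  omega

-- ===== PORT B =====
-- the while loop of Source B: while board[row][col] == player: count += 1; row -= 1; col -= 1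
def pvAltScan (player : String) (board : List (List String)) (row col count : Int) : Int :=
  match hspot : pvCellB board row col with
  | none => count     -- IndexError in the loop condition; excluded by Pre_
  | some spot =>
    if spot == player then pvAltScan player board (row - 1) (col - 1) (count + 1) else count
termination_by (row + (board.length : Int) + 1).toNat
decreasing_by
  have hr := pvCellB_row_lb hspot
  omega

def checkDiagonalBottomRightToLeft_alt (player : String) (place : List Int) (board : List (List String)) (count : Int) : Int :=
  match PySem.List.pyGet? place 0, PySem.List.pyGet? place 1 with
  | none, _ => count  -- Python raises IndexError here; excluded by Pre_
  | _, none => count  -- Python raises IndexError here; excluded by Pre_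
  | some row, some col => pvAltScan player board row col count

-- ===== PRECONDITION & SPEC =====
-- Pre_ = exactly the inputs on which Python A returns: place has both coordinates, and
-- walking the down-left diagonal (with Python's negative-index wraparound) reaches, after a
-- run of cells equal to player, an in-range cell different from player (rather than running
-- off the board, where both Pythons raise IndexError).
def Pre_checkDiagonalBottomRightToLeft (player : String) (place : List Int) (board : List (List String)) (count : Int) : Prop :=
  2 ≤ place.length ∧
  ∃ i < 2 * board.length,
    (∀ j < i, (PySem.List.pyGet? board (place.getD 0 0 - j)).bind
        (fun xs => PySem.List.pyGet? xs (place.getD 1 0 - j)) = some player) ∧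
    (PySem.List.pyGet? board (place.getD 0 0 - i)).bind
        (fun xs => PySem.List.pyGet? xs (place.getD 1 0 - i)) ≠ some player ∧
    (PySem.List.pyGet? board (place.getD 0 0 - i)).bind
        (fun xs => PySem.List.pyGet? xs (place.getD 1 0 - i)) ≠ none
instance (player : String) (place : List Int) (board : List (List String)) (count : Int) : Decidable (Pre_checkDiagonalBottomRightToLeft player place board count) := by unfold Pre_checkDiagonalBottomRightToLeft; infer_instance

def pvWitness_checkDiagonalBottomRightToLeft : String × List Int × List (List String) × Int :=
  ("X", [1, 1], [["O", "X"], ["O", "X"]], 0)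

def Spec_checkDiagonalBottomRightToLeft (player : String) (place : List Int) (board : List (List String)) (count : Int) (out : Int) : Prop := out = checkDiagonalBottomRightToLeft_alt player place board count
instance (player : String) (place : List Int) (board : List (List String)) (count : Int) (out : Int) : Decidable (Spec_checkDiagonalBottomRightToLeft player place board count out) := by unfold Spec_checkDiagonalBottomRightToLeft; infer_instance

-- ===== CLAIM (what is proved, stated in full; the proofs are below) =====
def Claim_equal_checkDiagonalBottomRightToLeft : Prop := ∀ (player : String) (place : List Int) (board : List (List String)) (count : Int), Dom_checkDiagonalBottomRightToLeft player place board count → Pre_checkDiagonalBottomRightToLeft player place board count → Spec_checkDiagonalBottomRightToLeft player place board count (checkDiagonalBottomRightToLeft player place board count)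

-- ===== LEMMAS AND PROOFS =====

theorem pvGet1 (row col : Int) (rest : List Int) :
    PySem.List.pyGet? (row :: col :: rest) 1 = some col := by
  have := PySem.List.pyGet?_of_nonneg (xs := row :: col :: rest) (i := 1) (by omega)
  simpa using this

-- the two ports subscript the board identically
theorem pvCellBA (board : List (List String)) (r c : Int) : pvCellB board r c = pvCellA board r c := by
  unfold pvCellA pvCellB
  cases PySem.List.pyGet? board r <;> rfl

-- one-step equations for port A on a list with both coordinates present
theorem pvA_none (player : String) (row col : Int) (rest : List Int) (board : List (List String)) (count : Int)
    (h : pvCellA board row col = none) :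
    checkDiagonalBottomRightToLeft player (row :: col :: rest) board count = count := by
  conv_lhs => rw [checkDiagonalBottomRightToLeft]
  rw [pvGet0, pvGet1]
  split <;> simp_all
  split <;> simp_all

theorem pvA_some (player : String) (row col : Int) (rest : List Int) (board : List (List String)) (count : Int)
    (spot : String) (h : pvCellA board row col = some spot) :
    checkDiagonalBottomRightToLeft player (row :: col :: rest) board count =
      if spot ≠ player then count
      else checkDiagonalBottomRightToLeft player [row - 1, col - 1] board (count + 1) := by
  conv_lhs => rw [checkDiagonalBottomRightToLeft]
  rw [pvGet0, pvGet1]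
  split <;> simp_all
  split <;> simp_all

-- one-step equations for B's loop
theorem pvScan_none (player : String) (board : List (List String)) (row col count : Int)
    (h : pvCellB board row col = none) : pvAltScan player board row col count = count := by
  rw [pvAltScan.eq_def]
  split <;> simp_all

theorem pvScan_some (player : String) (board : List (List String)) (row col count : Int)
    (spot : String) (h : pvCellB board row col = some spot) :
    pvAltScan player board row col count =
      if spot == player then pvAltScan player board (row - 1) (col - 1) (count + 1) else count := by
  rw [pvAltScan.eq_def]
  split <;> simp_all

-- the core equivalence: A's recursion and B's loop walk the same diagonal in lock step
theorem pvA_eq_scan (player : String) (board : List (List String)) :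
    ∀ (n : Nat) (row col : Int) (rest : List Int) (count : Int),
      (row + (board.length : Int) + 1).toNat ≤ n →
      checkDiagonalBottomRightToLeft player (row :: col :: rest) board count =
        pvAltScan player board row col count := by
  intro n
  induction n with
  | zero =>
    intro row col rest count hle
    have hcell : pvCellA board row col = none := by
      unfold pvCellA
      have : PySem.List.pyGet? board row = none := by
        rw [PySem.List.pyGet?_eq_none_iff]
        intro hin
        have := hin.1
        omega
      rw [this]; rfl
    rw [pvA_none _ _ _ _ _ _ hcell, pvScan_none _ _ _ _ _ ((pvCellBA board _ _).trans hcell)]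
  | succ n ih =>
    intro row col rest count hle
    cases hcell : pvCellA board row col with
    | none => rw [pvA_none _ _ _ _ _ _ hcell, pvScan_none _ _ _ _ _ ((pvCellBA board _ _).trans hcell)]
    | some spot =>
      rw [pvA_some _ _ _ _ _ _ _ hcell, pvScan_some _ _ _ _ _ _ ((pvCellBA board _ _).trans hcell)]
      by_cases hsp : spot = player
      · have hr := pvCellA_row_lb hcell
        simp only [hsp, ne_eq, not_true_eq_false, if_false, beq_self_eq_true, if_true]
        exact ih (row - 1) (col - 1) [] (count + 1) (by omega)
      · simp [hsp]

-- ===== VERDICT (by name: the statement is the Claim_ definition above) =====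
theorem checkDiagonalBottomRightToLeft_spec : Claim_equal_checkDiagonalBottomRightToLeft := by
  intro player place board count _hDom hPre
  unfold Spec_checkDiagonalBottomRightToLeft
  obtain ⟨hlen, -⟩ := hPre
  obtain ⟨row, col, rest, rfl⟩ : ∃ r c rest, place = r :: c :: rest := by
    match place, hlen with
    | r :: c :: rest, _ => exact ⟨r, c, rest, rfl⟩
  rw [pvA_eq_scan player board ((row + (board.length : Int) + 1).toNat) row col rest count le_rfl]
  unfold checkDiagonalBottomRightToLeft_alt
  rw [pvGet0, pvGet1]
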